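-- pv_equiv track=rewrite | github.com/garimaarora1/LeetCode-2023 | 0564-find-the-closest-palindrome/0564-find-the-closest-palindrome.py | convert
-- ===== SOURCE A (Python) =====
-- def convert(num: int) -> int:
--     s = str(num)
--     n = len(s)
--     l, r = 0, len(s)-1
--     s_list = list(s)
--     while l<=r:
--         s_list[r] = s_list[l]
--         r -= 1
--         l += 1
--     return int("".join(s_list))
-- ===== SOURCE B (Python) =====
-- def convert(num: int) -> int:
--     s = str(num)
--     half = s[:len(s) // 2]
--     mid = s[len(s) // 2] if len(s) % 2 else ''
--     return int(half + mid + half[::-1])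
-- ===== Notes on version B (the rewrite author's own statement) =====
-- stated objective: simpler
-- what changed: Replaces the two-pointer in-place mutation loop with a closed-form slice construction: left half + optional middle + reversed left half.
import Mathlib
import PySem

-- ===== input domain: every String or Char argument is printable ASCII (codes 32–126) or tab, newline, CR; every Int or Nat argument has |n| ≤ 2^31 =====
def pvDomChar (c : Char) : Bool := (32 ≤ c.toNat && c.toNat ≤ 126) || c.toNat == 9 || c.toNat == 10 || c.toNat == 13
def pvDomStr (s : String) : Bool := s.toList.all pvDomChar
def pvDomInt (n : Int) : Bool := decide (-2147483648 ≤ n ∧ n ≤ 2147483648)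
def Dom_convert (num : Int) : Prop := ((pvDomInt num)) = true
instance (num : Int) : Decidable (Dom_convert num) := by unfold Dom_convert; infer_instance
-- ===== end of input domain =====

-- B replaces A's two-pointer in-place mutation loop by a closed-form slice construction
-- (left half ++ optional middle ++ reversed left half): simpler, same cost.


-- ===== PORT A =====
-- the 'while l<=r' loop: s_list[r] = s_list[l]; r -= 1; l += 1
def convertLoop (sl : List Char) (l r : Int) : List Char :=
  if l ≤ r then
    convertLoop (PySem.List.pySetD sl r (PySem.List.pyGetD sl l ' ')) (l + 1) (r - 1)
  else sl
termination_by (r + 1 - l).toNat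
decreasing_by omega

def convert (num : Int) : Int :=
  let s := PySem.Int.toChars num
  let sl := convertLoop s 0 ((s.length : Int) - 1)
  (PySem.Int.ofChars? sl).getD 0

-- ===== PORT B =====
def convert_alt (num : Int) : Int :=
  let s := PySem.Int.toChars num
  let n : Int := (s.length : Int)
  let half := PySem.List.slice s none (some (PySem.Int.floordiv n 2))
  let mid := if PySem.Int.mod n 2 ≠ 0 then [PySem.List.pyGetD s (PySem.Int.floordiv n 2) ' '] else []
  (PySem.Int.ofChars? (half ++ mid ++ (PySem.List.slice? half none none (-1)).getD [])).getD 0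

-- ===== PRECONDITION & SPEC =====
-- Pre_ excludes negative num, on which Python A raises ValueError (the mirrored string keeps '-' at both ends).
def Pre_convert (num : Int) : Prop := 0 ≤ num
instance (num : Int) : Decidable (Pre_convert num) := by unfold Pre_convert; infer_instance
def pvWitness_convert : Int := 12345

def Spec_convert (num : Int) (out : Int) : Prop := out = convert_alt num
instance (num : Int) (out : Int) : Decidable (Spec_convert num out) := by unfold Spec_convert; infer_instance

-- ===== CLAIM (what is proved, stated in full; the proofs are below) =====
def Claim_equal_convert : Prop := ∀ (num : Int), Dom_convert num → Pre_convert num → Spec_convert num (convert num)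

-- ===== LEMMAS AND PROOFS =====

-- characterization of the mirror loop by positions
lemma convertLoop_char (k : Nat) : ∀ (sl : List Char) (l r : Int), 0 ≤ l → r < sl.length →
    (r + 1 - l).toNat ≤ k →
    (convertLoop sl l r).length = sl.length ∧
    ∀ i : Nat, i < sl.length →
      (convertLoop sl l r).getD i ' ' =
        if l + r ≤ 2 * i ∧ (i : Int) ≤ r then sl.getD (l + r - i).toNat ' ' else sl.getD i ' ' := by
  induction k with
  | zero =>
    intro sl l r hl hr hk
    rw [convertLoop.eq_def]
    have hlr : ¬ l ≤ r := by omega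
    rw [if_neg hlr]
    refine ⟨rfl, fun i hi => ?_⟩
    rw [if_neg (by omega)]
  | succ k ih =>
    intro sl l r hl hr hk
    by_cases hlr : l ≤ r
    · rw [convertLoop.eq_def, if_pos hlr]
      have hset : PySem.List.pySetD sl r (PySem.List.pyGetD sl l ' ')
          = sl.set r.toNat (sl.getD l.toNat ' ') := by
        rw [PySem.List.pySetD_of_nonneg _ _ (by omega), PySem.List.pyGetD_of_nonneg _ _ hl]
      obtain ⟨ihlen, ihget⟩ := ih (sl.set r.toNat (sl.getD l.toNat ' ')) (l + 1) (r - 1)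
        (by omega) (by simp only [List.length_set]; omega) (by omega)
      rw [hset]
      refine ⟨by rw [ihlen, List.length_set], fun i hi => ?_⟩
      rw [ihget i (by rw [List.length_set]; exact hi)]
      have hrl : r.toNat < sl.length := by omega
      have hgetset : ∀ j : Nat, j < sl.length →
          (sl.set r.toNat (sl.getD l.toNat ' ')).getD j ' '
            = if j = r.toNat then sl.getD l.toNat ' ' else sl.getD j ' ' := by
        intro j hj
        by_cases h : j = r.toNat
        · subst h
          rw [if_pos rfl, List.getD_eq_getElem _ _ (by simpa using hj),
            List.getElem_set_self (by simpa using hj)]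
        · rw [if_neg h, List.getD_eq_getElem _ _ (by simpa using hj),
            List.getElem_set_ne (by omega), List.getD_eq_getElem _ _ hj]
      by_cases hc : l + 1 + (r - 1) ≤ 2 * i ∧ (i : Int) ≤ r - 1
      · rw [if_pos hc, if_pos (by omega)]
        rw [hgetset _ (by omega)]
        rw [if_neg (by omega)]
        congr 2
        omega
      · rw [if_neg hc, hgetset i hi]
        by_cases hir : i = r.toNat
        · rw [if_pos hir, if_pos (by omega)]
          congr 2
          omega
        · rw [if_neg hir, if_neg (by omega)]
    · rw [convertLoop.eq_def, if_neg hlr]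
      refine ⟨rfl, fun i hi => ?_⟩
      rw [if_neg (by omega)]

-- the two constructions yield the same character list, for every s
lemma lists_eq (s : List Char) :
    convertLoop s 0 ((s.length : Int) - 1) =
      s.take (s.length / 2) ++
        (if s.length % 2 = 1 then [s.getD (s.length / 2) ' '] else []) ++
        (s.take (s.length / 2)).reverse := by
  obtain ⟨hlen, hget⟩ := convertLoop_char ((0 : Int) + (s.length : Int) - 1 + 1 - 0).toNat s 0
    ((s.length : Int) - 1) (by omega) (by omega) (by omega)
  have htl : (s.take (s.length / 2)).length = s.length / 2 := by
    rw [List.length_take]; omega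
  -- A's element characterization, in Nat form
  have hA : ∀ (i : Nat) (hi : i < s.length),
      (convertLoop s 0 ((s.length : Int) - 1)).getD i ' ' =
        if s.length ≤ 2 * i + 1 then s.getD (s.length - 1 - i) ' ' else s.getD i ' ' := by
    intro i hi
    rw [hget i hi]
    by_cases hc : s.length ≤ 2 * i + 1
    · rw [if_pos (by constructor <;> omega), if_pos hc]
      congr 1
      omega
    · rw [if_neg (by omega), if_neg hc]
  rcases Nat.mod_two_eq_zero_or_one s.length with hpar | hpar
  · -- even length: no middle element
    rw [hpar]
    simp only [Nat.zero_ne_one, if_false, List.append_nil]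
    have hBlen : (s.take (s.length / 2) ++ (s.take (s.length / 2)).reverse).length = s.length := by
      simp only [List.length_append, List.length_reverse, htl]; omega
    apply List.ext_getElem (by rw [hlen, hBlen])
    intro i hiA hiB
    have hi : i < s.length := by rw [hlen] at hiA; exact hiA
    rw [← List.getD_eq_getElem (convertLoop s 0 ((s.length : Int) - 1)) ' ' hiA,
      ← List.getD_eq_getElem (s.take (s.length / 2) ++ (s.take (s.length / 2)).reverse) ' ' hiB,
      hA i hi]
    by_cases h1 : i < s.length / 2
    · rw [if_neg (by omega)]
      rw [List.getD_append (s.take (s.length / 2)) ((s.take (s.length / 2)).reverse) ' ' i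
        (by rw [htl]; omega)]
      rw [List.getD_eq_getElem (s.take (s.length / 2)) ' ' (by rw [htl]; omega)]
      rw [List.getElem_take]
      rw [← List.getD_eq_getElem s ' ' hi]
    · rw [if_pos (by omega)]
      rw [List.getD_append_right (s.take (s.length / 2)) ((s.take (s.length / 2)).reverse) ' ' i
        (by rw [htl]; omega)]
      rw [List.getD_eq_getElem ((s.take (s.length / 2)).reverse) ' '
        (by rw [List.length_reverse, htl]; omega)]
      rw [List.getElem_reverse]
      rw [List.getElem_take]
      rw [← List.getD_eq_getElem s ' ' (by rw [List.length_take] at *; omega)]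
      have hidx : (s.take (s.length / 2)).length - 1 - (i - (s.take (s.length / 2)).length)
          = s.length - 1 - i := by
        rw [htl]; omega
      rw [hidx]
  · -- odd length: singleton middle
    rw [hpar]
    simp only [if_true]
    have hBlen : ((s.take (s.length / 2) ++ [s.getD (s.length / 2) ' ']) ++
        (s.take (s.length / 2)).reverse).length = s.length := by
      simp only [List.length_append, List.length_reverse, htl, List.length_cons,
        List.length_nil]
      omega
    apply List.ext_getElem (by rw [hlen, hBlen])
    intro i hiA hiB
    have hi : i < s.length := by rw [hlen] at hiA; exact hiA
    rw [← List.getD_eq_getElem (convertLoop s 0 ((s.length : Int) - 1)) ' ' hiA,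
      ← List.getD_eq_getElem ((s.take (s.length / 2) ++ [s.getD (s.length / 2) ' ']) ++
        (s.take (s.length / 2)).reverse) ' ' hiB,
      hA i hi]
    by_cases h1 : i < s.length / 2
    · rw [if_neg (by omega)]
      rw [List.getD_append (s.take (s.length / 2) ++ [s.getD (s.length / 2) ' '])
        ((s.take (s.length / 2)).reverse) ' ' i
        (by simp only [List.length_append, htl, List.length_cons, List.length_nil]; omega)]
      rw [List.getD_append (s.take (s.length / 2)) [s.getD (s.length / 2) ' '] ' ' i
        (by rw [htl]; omega)]
      rw [List.getD_eq_getElem (s.take (s.length / 2)) ' ' (by rw [htl]; omega)]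
      rw [List.getElem_take]
      rw [← List.getD_eq_getElem s ' ' hi]
    · by_cases h2 : i = s.length / 2
      · rw [if_pos (by omega)]
        rw [List.getD_append (s.take (s.length / 2) ++ [s.getD (s.length / 2) ' '])
          ((s.take (s.length / 2)).reverse) ' ' i
          (by simp only [List.length_append, htl, List.length_cons, List.length_nil]; omega)]
        rw [List.getD_append_right (s.take (s.length / 2)) [s.getD (s.length / 2) ' '] ' ' i
          (by rw [htl]; omega)]
        rw [htl, h2]
        simp only [Nat.sub_self, List.getD_cons_zero]
        have hidx : s.length - 1 - s.length / 2 = s.length / 2 := by omega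
        rw [hidx]
      · rw [if_pos (by omega)]
        rw [List.getD_append_right (s.take (s.length / 2) ++ [s.getD (s.length / 2) ' '])
          ((s.take (s.length / 2)).reverse) ' ' i
          (by simp only [List.length_append, htl, List.length_cons, List.length_nil]; omega)]
        rw [List.getD_eq_getElem ((s.take (s.length / 2)).reverse) ' '
          (by simp only [List.length_reverse, List.length_append, htl, List.length_cons,
            List.length_nil]; omega)]
        rw [List.getElem_reverse]
        rw [List.getElem_take]
        rw [← List.getD_eq_getElem s ' ' (by rw [List.length_take] at *; omega)]
        have hidx : (s.take (s.length / 2)).length - 1 -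
            (i - (s.take (s.length / 2) ++ [s.getD (s.length / 2) ' ']).length)
            = s.length - 1 - i := by
          simp only [List.length_append, htl, List.length_cons, List.length_nil]
          omega
        rw [hidx]

-- ===== VERDICT (by name: the statement is the Claim_ definition above) =====
theorem convert_spec : Claim_equal_convert := by
  intro num _ _
  unfold Spec_convert convert convert_alt
  simp only
  have hdiv : PySem.Int.floordiv ((PySem.Int.toChars num).length : Int) 2
      = (((PySem.Int.toChars num).length / 2 : Nat) : Int) := by
    exact_mod_cast PySem.Int.floordiv_natCast (PySem.Int.toChars num).length 2
  have hmod : PySem.Int.mod ((PySem.Int.toChars num).length : Int) 2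
      = (((PySem.Int.toChars num).length % 2 : Nat) : Int) := by
    exact_mod_cast PySem.Int.mod_natCast (PySem.Int.toChars num).length 2
  have hhalf : PySem.List.slice (PySem.Int.toChars num) none
        (some (PySem.Int.floordiv ((PySem.Int.toChars num).length : Int) 2))
      = (PySem.Int.toChars num).take ((PySem.Int.toChars num).length / 2) := by
    rw [hdiv, PySem.List.slice_to _ (by omega)]
    rw [Int.toNat_natCast]
  have hmid : (if PySem.Int.mod ((PySem.Int.toChars num).length : Int) 2 ≠ 0
        then [PySem.List.pyGetD (PySem.Int.toChars num)
          (PySem.Int.floordiv ((PySem.Int.toChars num).length : Int) 2) ' '] else [])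
      = (if (PySem.Int.toChars num).length % 2 = 1
        then [(PySem.Int.toChars num).getD ((PySem.Int.toChars num).length / 2) ' '] else []) := by
    rw [hmod, hdiv]
    rcases Nat.mod_two_eq_zero_or_one (PySem.Int.toChars num).length with h | h
    · rw [h]
      rw [if_neg (by simp), if_neg (by decide)]
    · rw [h]
      rw [if_pos (by decide), if_pos rfl,
        PySem.List.pyGetD_of_nonneg _ _ (by omega), Int.toNat_natCast]
  rw [hhalf, hmid, PySem.List.slice?_none_none_neg_one, Option.getD_some, lists_eq]
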